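-- pv_equiv track=rewrite | github.com/m1sterzer0/DaveProgrammingCompetitions | hackercup/python/2016/qual_A.py | solve
-- ===== SOURCE A (Python) =====
-- def solve(N,X,Y) :
--     ans = 0
--     d = {}
--     for i in range(N) :
--         d.clear()
--         for j in range(N) :
--             if j == i : continue
--             dd = (X[i]-X[j])**2+(Y[i]-Y[j])**2
--             if dd not in d : d[dd] = 0
--             d[dd] += 1
--         for dd in d :
--             x = d[dd]
--             ans += (x) * (x-1) // 2
--     return ans
-- ===== SOURCE B (Python) =====
-- def solve(N, X, Y):
--     ans = 0
--     for i in range(N):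
--         for j in range(N):
--             if j == i:
--                 continue
--             dj = (X[i] - X[j]) ** 2 + (Y[i] - Y[j]) ** 2
--             for k in range(j + 1, N):
--                 if k == i:
--                     continue
--                 dk = (X[i] - X[k]) ** 2 + (Y[i] - Y[k]) ** 2
--                 if dj == dk:
--                     ans += 1
--     return ans
-- ===== Notes on version B (the rewrite author's own statement) =====
-- stated objective: alternative
-- what changed: replaced A's per-center hash-counter (build a dict of squared-distance multiplicities, then sum x*(x-1)//2 over it) by direct dict-free brute-force enumeration of every unordered pair (j,k) around each center, counting pairs at equal squared distance; it trades A's O(n^2) hashing for an O(n^3) pair scan with no auxiliary data structure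
import Mathlib
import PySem

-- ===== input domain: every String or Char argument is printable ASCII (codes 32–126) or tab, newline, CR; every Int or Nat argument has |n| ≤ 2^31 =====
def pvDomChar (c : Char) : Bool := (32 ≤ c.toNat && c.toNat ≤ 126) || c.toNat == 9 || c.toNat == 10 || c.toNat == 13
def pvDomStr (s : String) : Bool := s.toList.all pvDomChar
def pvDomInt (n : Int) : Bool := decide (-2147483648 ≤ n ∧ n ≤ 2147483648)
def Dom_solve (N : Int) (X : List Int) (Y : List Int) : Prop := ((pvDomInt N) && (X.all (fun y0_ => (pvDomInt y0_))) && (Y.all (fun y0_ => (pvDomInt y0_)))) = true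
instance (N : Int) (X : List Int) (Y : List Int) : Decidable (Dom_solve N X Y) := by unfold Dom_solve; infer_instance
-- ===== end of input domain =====

-- B replaces A's per-center dict of squared-distance multiplicities (and the x*(x-1)//2 pass over it)
-- by dict-free brute-force enumeration of every unordered pair (j,k) around each center i.

-- ===== PORT A =====
def solve (N : Int) (X : List Int) (Y : List Int) : Int :=
  (PySem.List.pyRange 0 N 1).foldl (fun ans i =>
    let d : PySem.Dict Int Int :=
      (PySem.List.pyRange 0 N 1).foldl (fun d j =>
        if j == i then d
        else
          let dd := (PySem.List.pyGetD X i 0 - PySem.List.pyGetD X j 0) ^ 2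
                    + (PySem.List.pyGetD Y i 0 - PySem.List.pyGetD Y j 0) ^ 2
          let d1 := if d.contains dd then d else d.insert dd 0
          d1.insert dd (d1.getD dd 0 + 1)) PySem.Dict.empty
    d.keys.foldl (fun ans dd =>
      let x := d.getD dd 0
      ans + PySem.Int.floordiv (x * (x - 1)) 2) ans) 0

-- ===== PORT B =====
def solve_alt (N : Int) (X : List Int) (Y : List Int) : Int :=
  (PySem.List.pyRange 0 N 1).foldl (fun ans i =>
    (PySem.List.pyRange 0 N 1).foldl (fun ans j =>
      if j == i then ans
      else
        let dj := (PySem.List.pyGetD X i 0 - PySem.List.pyGetD X j 0) ^ 2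
                  + (PySem.List.pyGetD Y i 0 - PySem.List.pyGetD Y j 0) ^ 2
        (PySem.List.pyRange (j + 1) N 1).foldl (fun ans k =>
          if k == i then ans
          else
            let dk := (PySem.List.pyGetD X i 0 - PySem.List.pyGetD X k 0) ^ 2
                      + (PySem.List.pyGetD Y i 0 - PySem.List.pyGetD Y k 0) ^ 2
            if dj == dk then ans + 1 else ans) ans) ans) 0

-- ===== PRECONDITION & SPEC =====
-- Python A indexes X[i], Y[i] for 0 ≤ i < N: it raises IndexError unless N ≤ len(X) and N ≤ len(Y).
def Pre_solve (N : Int) (X : List Int) (Y : List Int) : Prop :=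
  N ≤ (X.length : Int) ∧ N ≤ (Y.length : Int)
instance (N : Int) (X : List Int) (Y : List Int) : Decidable (Pre_solve N X Y) := by
  unfold Pre_solve; infer_instance
def pvWitness_solve : Int × List Int × List Int := (3, [0, 3, 0], [0, 0, 4])
def Spec_solve (N : Int) (X : List Int) (Y : List Int) (out : Int) : Prop := out = solve_alt N X Y
instance (N : Int) (X : List Int) (Y : List Int) (out : Int) : Decidable (Spec_solve N X Y out) := by unfold Spec_solve; infer_instance

-- ===== CLAIM (what is proved, stated in full; the proofs are below) =====
def Claim_equal_solve : Prop := ∀ (N : Int) (X : List Int) (Y : List Int), Dom_solve N X Y → Pre_solve N X Y → Spec_solve N X Y (solve N X Y)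

-- ===== LEMMAS AND PROOFS =====

-- pcount pre l = Σ over positions of l of the number of equal earlier elements (pre counted first).
def pcount : List Int → List Int → Int
  | _, [] => 0
  | pre, x :: l => pre.count x + pcount (pre ++ [x]) l

-- qcount l = Σ over positions of l of the number of equal LATER elements;
-- this is what B's pair enumeration accumulates per center.
def qcount : List Int → Int
  | [] => 0
  | x :: l => l.count x + qcount l

lemma pcount_snoc (L : List Int) : ∀ (pre : List Int) (x : Int),
    pcount pre (L ++ [x]) = pcount pre L + ((pre ++ L).count x : Int) := by
  induction L with
  | nil => intro pre x; simp [pcount]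
  | cons y L ih =>
      intro pre x
      simp [pcount, ih (pre ++ [y]) x, List.append_assoc]
      ring

lemma qcount_snoc (L : List Int) (x : Int) :
    qcount (L ++ [x]) = qcount L + (L.count x : Int) := by
  induction L with
  | nil => simp [qcount]
  | cons a L ih =>
      have h1 : qcount ((a :: L) ++ [x]) = (((L ++ [x]).count a : Nat) : Int) + qcount (L ++ [x]) := rfl
      have h2 : qcount (a :: L) = ((L.count a : Nat) : Int) + qcount L := rfl
      rw [h1, ih, h2]
      by_cases h : a = x
      · subst h
        have hc1 : (L ++ [a]).count a = L.count a + 1 := by simp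
        have hc2 : (a :: L).count a = L.count a + 1 := by simp
        rw [hc1, hc2]
        push_cast
        ring
      · have hc1 : (L ++ [x]).count a = L.count a := by
          rw [List.count_append, List.count_eq_zero.mpr (by simp [h] : a ∉ [x])]
          simp
        have hc2 : (a :: L).count x = L.count x := by
          rw [List.count_cons]
          rw [beq_eq_false_iff_ne.mpr h]
          simp
        rw [hc1, hc2]
        ring

lemma qcount_eq_pcount (L : List Int) : qcount L = pcount [] L := by
  induction L using List.reverseRecOn with
  | nil => simp [qcount, pcount]
  | append_singleton L x ih => rw [qcount_snoc, pcount_snoc, ih]; simp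

lemma choose2_succ (c : Int) :
    PySem.Int.floordiv ((c + 1) * c) 2 = PySem.Int.floordiv (c * (c - 1)) 2 + c := by
  rw [PySem.Int.floordiv_eq_ediv_of_pos (by norm_num), PySem.Int.floordiv_eq_ediv_of_pos (by norm_num)]
  obtain ⟨t, ht⟩ : (2 : Int) ∣ c * (c - 1) := (Int.even_mul_pred_self c).two_dvd
  have h2 : (c + 1) * c = c * (c - 1) + 2 * c := by ring
  omega

lemma sum_ite_nodup (x c : Int) : ∀ (s : List Int), s.Nodup → x ∈ s →
    (s.map (fun k => if k = x then c else 0)).sum = c := by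
  intro s
  induction s with
  | nil => intro _ h; cases h
  | cons a s ih =>
      intro hnd hx
      by_cases ha : a = x
      · subst ha
        have hz : ∀ k ∈ s, (if k = a then c else 0) = 0 := by
          intro k hk
          have : k ≠ a := fun h => (List.nodup_cons.1 hnd).1 (h ▸ hk)
          simp [this]
        rw [List.map_cons, List.sum_cons, if_pos rfl,
           List.map_congr_left (g := fun _ => (0 : Int)) hz]
        simp
      · have hx' : x ∈ s := by cases hx with
          | head => exact absurd rfl ha
          | tail _ h => exact h
        simp [ha, ih (List.nodup_cons.1 hnd).2 hx']

-- the dict pass of A telescopes to the earlier-equal count, for any list of distance keys K.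
lemma sum_C_eq_pcount (K : List Int) :
    ((PySem.Set.ofList K).map (fun k =>
        PySem.Int.floordiv ((K.count k : Int) * ((K.count k : Int) - 1)) 2)).sum
      = pcount [] K := by
  induction K using List.reverseRecOn with
  | nil => simp [pcount]
  | append_singleton K x ih =>
      rw [pcount_snoc, ← ih, PySem.Set.ofList_append_singleton]
      by_cases hx : x ∈ PySem.Set.ofList K
      · rw [PySem.Set.add_of_mem hx]
        have hstep : ∀ k ∈ PySem.Set.ofList K,
            PySem.Int.floordiv (((K ++ [x]).count k : Int) * (((K ++ [x]).count k : Int) - 1)) 2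
              = PySem.Int.floordiv ((K.count k : Int) * ((K.count k : Int) - 1)) 2
                + (if k = x then (K.count x : Int) else 0) := by
          intro k _
          by_cases hk : k = x
          · subst hk
            simp only [List.count_append, List.count_singleton]
            push_cast
            simpa using choose2_succ (K.count k : Int)
          · simp [List.count_append, Ne.symm hk, hk]
        rw [List.map_congr_left hstep]
        rw [show (fun k => PySem.Int.floordiv ((K.count k : Int) * ((K.count k : Int) - 1)) 2
              + (if k = x then (K.count x : Int) else 0))
            = (fun k => (fun k => PySem.Int.floordiv ((K.count k : Int) * ((K.count k : Int) - 1)) 2) k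
              + (fun k => if k = x then (K.count x : Int) else 0) k) from rfl]
        rw [PySem.List.sum_map_add_int]
        rw [sum_ite_nodup x _ _ (PySem.Set.nodup_ofList K) hx]
        simp
      · rw [PySem.Set.add_of_not_mem hx]
        have hxK : x ∉ K := fun h => hx ((PySem.Set.mem_ofList K x).2 h)
        have hstep : ∀ k ∈ PySem.Set.ofList K,
            PySem.Int.floordiv (((K ++ [x]).count k : Int) * (((K ++ [x]).count k : Int) - 1)) 2
              = PySem.Int.floordiv ((K.count k : Int) * ((K.count k : Int) - 1)) 2 := by
          intro k hk
          have : k ≠ x := fun h => hx (h ▸ hk)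
          simp [List.count_append, Ne.symm this]
        rw [List.map_append, List.sum_append, List.map_congr_left hstep]
        simp [List.count_append, List.count_eq_zero_of_not_mem hxK]

lemma A_step_eq (d : PySem.Dict Int Int) (dd : Int) :
    (let d1 := if d.contains dd then d else d.insert dd 0
     d1.insert dd (d1.getD dd 0 + 1)) = d.insert dd (d.getD dd 0 + 1) := by
  cases h : d.contains dd with
  | true => simp
  | false =>
      simp [PySem.Dict.getD_insert_self, PySem.Dict.insert_insert_self,
        PySem.Dict.getD_of_not_contains d 0 h]

-- A's per-center dict is the counter of the distance-key list K.
lemma A_inner (K : List Int) :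
    K.foldl (fun (d : PySem.Dict Int Int) dd =>
        let d1 := if d.contains dd then d else d.insert dd 0
        d1.insert dd (d1.getD dd 0 + 1)) PySem.Dict.empty
      = PySem.Dict.counter K := by
  rw [List.foldl_ext _ (fun d dd => d.insert dd (d.getD dd 0 + 1)) _
      (fun d dd _ => A_step_eq d dd)]
  exact PySem.Dict.foldl_insert_getD_add_one_eq_counter K

-- A's sum over the dict equals ans + pcount [] K.
lemma A_sum (K : List Int) (ans : Int) :
    (PySem.Dict.counter K : PySem.Dict Int Int).keys.foldl (fun a dd =>
        let x := (PySem.Dict.counter K : PySem.Dict Int Int).getD dd 0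
        a + PySem.Int.floordiv (x * (x - 1)) 2) ans
      = ans + pcount [] K := by
  rw [PySem.List.foldl_add _ (fun dd =>
        let x := (PySem.Dict.counter K : PySem.Dict Int Int).getD dd 0
        PySem.Int.floordiv (x * (x - 1)) 2) ans]
  rw [PySem.Dict.keys_counter]
  rw [List.map_congr_left (g := fun k =>
        PySem.Int.floordiv ((K.count k : Int) * ((K.count k : Int) - 1)) 2)
      (fun k _ => by simp [PySem.Dict.getD_counter])]
  rw [sum_C_eq_pcount]

-- B's innermost k-loop counts later indices k ≠ i with an equal distance key.
lemma B_inner3 (i v : Int) (f : Int → Int) : ∀ (l : List Int) (acc : Int),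
    l.foldl (fun ans k => if k == i then ans else if v == f k then ans + 1 else ans) acc
      = acc + (((l.filter (fun k => !(k == i))).map f).count v : Int) := by
  intro l
  induction l with
  | nil => intro acc; simp
  | cons k l ih =>
      intro acc
      simp only [List.foldl_cons, List.filter_cons]
      cases hk : (k == i) with
      | true =>
          simp only [eq_self_iff_true, if_true, Bool.not_true, Bool.not_false, Bool.false_eq_true, if_false]
          exact ih acc
      | false =>
          simp only [eq_self_iff_true, if_true, Bool.not_true, Bool.not_false, Bool.false_eq_true, if_false]
          cases hv : (v == f k) with
          | true =>
              simp only [eq_self_iff_true, if_true, Bool.not_true, Bool.not_false, Bool.false_eq_true, if_false]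
              rw [ih (acc + 1)]
              have hfv : (f k == v) = true := by
                rw [beq_iff_eq] at hv ⊢; omega
              simp only [List.map_cons, List.count_cons, hfv, eq_self_iff_true, if_true]
              push_cast
              ring
          | false =>
              simp only [eq_self_iff_true, if_true, Bool.not_true, Bool.not_false, Bool.false_eq_true, if_false]
              rw [ih acc]
              have hfv : (f k == v) = false := by
                rw [beq_eq_false_iff_ne] at hv ⊢; exact fun h => hv h.symm
              simp only [List.map_cons, List.count_cons, hfv, Bool.false_eq_true, if_false]
              ring

-- B's outer j-loop over pyRange a N 1 accumulates qcount of the filtered distance keys from a.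
lemma B_outer (N i : Int) (f : Int → Int) : ∀ (n : Nat) (a acc : Int), (N - a).toNat = n →
    (PySem.List.pyRange a N 1).foldl (fun ans j =>
        if j == i then ans
        else
          (PySem.List.pyRange (j + 1) N 1).foldl (fun ans k =>
            if k == i then ans else if f j == f k then ans + 1 else ans) ans) acc
      = acc + qcount (((PySem.List.pyRange a N 1).filter (fun k => !(k == i))).map f) := by
  intro n
  induction n with
  | zero =>
      intro a acc h
      have : N ≤ a := by omega
      rw [PySem.List.pyRange_one_eq_nil this]
      simp [qcount]
  | succ n ih =>
      intro a acc h
      by_cases hlt : a < N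
      · rw [PySem.List.pyRange_one_cons hlt]
        simp only [List.foldl_cons, List.filter_cons]
        cases hai : (a == i) with
        | true =>
            simp only [eq_self_iff_true, if_true, Bool.not_true, Bool.not_false, Bool.false_eq_true, if_false]
            exact ih (a + 1) acc (by omega)
        | false =>
            simp only [eq_self_iff_true, if_true, Bool.not_true, Bool.not_false, Bool.false_eq_true, if_false]
            rw [B_inner3 i (f a) f, ih (a + 1) _ (by omega)]
            simp only [List.map_cons, qcount]
            push_cast
            ring
      · rw [PySem.List.pyRange_one_eq_nil (by omega)]
        simp [qcount]

-- both outer step functions agree for every (ans, i).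
lemma step_eq (N : Int) (X Y : List Int) (ans i : Int) :
    (let d : PySem.Dict Int Int :=
      (PySem.List.pyRange 0 N 1).foldl (fun d j =>
        if j == i then d
        else
          let dd := (PySem.List.pyGetD X i 0 - PySem.List.pyGetD X j 0) ^ 2
                    + (PySem.List.pyGetD Y i 0 - PySem.List.pyGetD Y j 0) ^ 2
          let d1 := if d.contains dd then d else d.insert dd 0
          d1.insert dd (d1.getD dd 0 + 1)) PySem.Dict.empty
     d.keys.foldl (fun ans dd =>
      let x := d.getD dd 0
      ans + PySem.Int.floordiv (x * (x - 1)) 2) ans)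
    = (PySem.List.pyRange 0 N 1).foldl (fun ans j =>
        if j == i then ans
        else
          let dj := (PySem.List.pyGetD X i 0 - PySem.List.pyGetD X j 0) ^ 2
                    + (PySem.List.pyGetD Y i 0 - PySem.List.pyGetD Y j 0) ^ 2
          (PySem.List.pyRange (j + 1) N 1).foldl (fun ans k =>
            if k == i then ans
            else
              let dk := (PySem.List.pyGetD X i 0 - PySem.List.pyGetD X k 0) ^ 2
                        + (PySem.List.pyGetD Y i 0 - PySem.List.pyGetD Y k 0) ^ 2
              if dj == dk then ans + 1 else ans) ans) ans := by
  set f : Int → Int := fun j =>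
    (PySem.List.pyGetD X i 0 - PySem.List.pyGetD X j 0) ^ 2
      + (PySem.List.pyGetD Y i 0 - PySem.List.pyGetD Y j 0) ^ 2 with hfdef
  set K : List Int := ((PySem.List.pyRange 0 N 1).filter (fun j => !(j == i))).map f with hK
  -- A side
  have hA : (PySem.List.pyRange 0 N 1).foldl (fun (d : PySem.Dict Int Int) j =>
        if j == i then d
        else
          let d1 := if d.contains (f j) then d else d.insert (f j) 0
          d1.insert (f j) (d1.getD (f j) 0 + 1)) PySem.Dict.empty
      = PySem.Dict.counter K := by
    rw [← A_inner K, hK, List.foldl_map, List.foldl_filter]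
    exact List.foldl_ext _ _ _ (fun d j _ => by cases h : (j == i) <;> simp)
  simp only []
  rw [hA, A_sum K ans, B_outer N i f (N - 0).toNat 0 ans rfl, ← hK, qcount_eq_pcount]

-- ===== VERDICT (by name: the statement is the Claim_ definition above) =====
theorem solve_spec : Claim_equal_solve := by
  intro N X Y _ _
  unfold Spec_solve solve solve_alt
  exact List.foldl_ext _ _ _ (fun ans i _ => step_eq N X Y ans i)
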